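-- pv_equiv track=rewrite | github.com/maddytess/skill2adk | escher-adk-packages/domain.security.iam/tools/azure.analyse_rbac_paths/azure.analyse_rbac_paths.py | _apply_deny
-- ===== SOURCE A (Python) =====
-- def _apply_deny(allowed: set, denied: set) -> set:
--     """Subtract denied actions from allowed. Wildcard deny clears everything."""
--     if not denied:
--         return allowed
--     if "*" in denied:
--         return set()
--     result = set()
--     for action in allowed:
--         if action in denied:
--             continue
--         # Service-wildcard deny: "iam:*" in denied removes "iam:CreateRole"
--         if ":" in action:
--             service_wildcard = action.split(":")[0] + ":*"
--             if service_wildcard in denied: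
--                 continue
--         result.add(action)
--     return result
-- ===== SOURCE B (Python) =====
-- def _apply_deny(allowed: set, denied: set) -> set:
--     """Subtract denied actions from allowed. Wildcard deny clears everything."""
--     if not denied:
--         return allowed
--     if "*" in denied:
--         return set()
--     # Stage 1: exact denies removed wholesale by set difference.
--     survivors = allowed - denied
--     # Stage 2: rule-driven — each service-wildcard deny rule prunes its own service's actions.
--     for d in denied:
--         if d.endswith(":*"):
--             svc = d[:-2]
--             survivors = {a for a in survivors
--                          if ":" not in a or a.split(":")[0] != svc}
--     return survivors
-- ===== Notes on version B (the rewrite author's own statement) =====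
-- stated objective: alternative
-- what changed: B works in staged passes driven by the deny rules: first a wholesale set difference removes the exact denies, then it loops over the DENIED set and lets each 'service:*' wildcard rule prune the surviving actions of its service, instead of A's single action-driven loop that reconstructs 'service:*' per allowed action and probes the denied set.
import Mathlib
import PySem

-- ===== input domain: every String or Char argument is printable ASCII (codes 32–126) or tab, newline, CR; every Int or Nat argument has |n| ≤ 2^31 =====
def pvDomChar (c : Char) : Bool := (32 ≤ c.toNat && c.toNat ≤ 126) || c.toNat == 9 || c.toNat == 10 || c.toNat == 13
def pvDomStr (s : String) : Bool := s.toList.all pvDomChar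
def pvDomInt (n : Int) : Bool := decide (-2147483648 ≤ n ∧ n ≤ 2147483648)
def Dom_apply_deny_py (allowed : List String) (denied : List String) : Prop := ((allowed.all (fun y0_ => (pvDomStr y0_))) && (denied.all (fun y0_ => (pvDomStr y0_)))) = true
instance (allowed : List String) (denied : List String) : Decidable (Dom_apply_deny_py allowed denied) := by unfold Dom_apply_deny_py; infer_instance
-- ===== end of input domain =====

-- B replaces A's single action-driven loop by staged passes driven by the deny rules:
-- a wholesale set difference removes the exact denies, then each 'service:*' wildcard
-- rule prunes the surviving actions of its service (objective: alternative; same cost).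

-- ===== PORT A =====
-- Python string concatenation a + b (exact: code-point list append)
def pvStrCat (a b : String) : String := String.ofList (a.toList ++ b.toList)

def apply_deny_py (allowed : List String) (denied : List String) : List String :=
  if denied = [] then allowed
  else if denied.contains "*" then []
  else
    allowed.foldl (fun result action =>
      if denied.contains action then result
      else if PySem.Str.isIn ":" action then
        let service_wildcard := pvStrCat (PySem.List.pyGetD ((PySem.Str.split? action ":").getD []) 0 "") ":*"
        if denied.contains service_wildcard then result
        else PySem.Set.add result action
      else PySem.Set.add result action) []

-- ===== PORT B =====
-- B-side helper: one wildcard deny rule pruning the survivors of its service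
def pvPrune (surv : PySem.Set String) (d : String) : PySem.Set String :=
  if PySem.Str.endswith d ":*" then
    let svc := PySem.Str.slice d none (some (-2))
    surv.filter (fun a => !PySem.Str.isIn ":" a ||
      !(PySem.List.pyGetD ((PySem.Str.split? a ":").getD []) 0 "" == svc))
  else surv

def apply_deny_py_alt (allowed : List String) (denied : List String) : List String :=
  if denied = [] then allowed
  else if denied.contains "*" then []
  else
    let survivors : PySem.Set String := PySem.Set.diff (PySem.Set.ofList allowed) denied
    denied.foldl pvPrune survivors

-- ===== PRECONDITION & SPEC =====
def Spec_apply_deny_py (allowed : List String) (denied : List String) (out : List String) : Prop := out = apply_deny_py_alt allowed denied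
instance (allowed : List String) (denied : List String) (out : List String) : Decidable (Spec_apply_deny_py allowed denied out) := by unfold Spec_apply_deny_py; infer_instance

-- ===== CLAIM (what is proved, stated in full; the proofs are below) =====
def Claim_equal_apply_deny_py : Prop := ∀ (allowed : List String) (denied : List String), Dom_apply_deny_py allowed denied → Spec_apply_deny_py allowed denied (apply_deny_py allowed denied)

-- ===== LEMMAS AND PROOFS =====

-- d ends with ":*"  →  d[:-2] ++ ":*" = d
lemma eq_slice_append_of_endswith (d : String) (h : PySem.Str.endswith d ":*" = true) :
    pvStrCat (PySem.Str.slice d none (some (-2))) ":*" = d := by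
  apply String.toList_inj.mp
  have hsuf : (":*".toList) <:+ d.toList :=
    (PySem.Chars.endswith_iff (s := d.toList) (p := ":*".toList)).mp (by simpa using h)
  obtain ⟨pre, hpre⟩ := hsuf
  simp only [pvStrCat, String.toList_ofList, PySem.Str.toList_slice]
  rw [PySem.Chars.slice_eq_listSlice, PySem.List.slice_to_neg_ofNat d.toList 2 (by omega), ← hpre]
  simp [List.length_append]

-- s ++ ":*" sliced back gives s, and it ends with ":*"
lemma slice_cat_wild (s : String) :
    PySem.Str.slice (pvStrCat s ":*") none (some (-2)) = s ∧
    PySem.Str.endswith (pvStrCat s ":*") ":*" = true := by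
  constructor
  · apply String.toList_inj.mp
    simp only [PySem.Str.toList_slice, PySem.Chars.slice_eq_listSlice, pvStrCat, String.toList_ofList]
    rw [PySem.List.slice_to_neg_ofNat _ 2 (by omega)]
    simp [List.length_append]
  · have : (":*".toList) <:+ (pvStrCat s ":*").toList := by simp [pvStrCat]
    simpa using (PySem.Chars.endswith_iff (s := (pvStrCat s ":*").toList) (p := ":*".toList)).mpr (by simpa using this)

-- A's loop with an arbitrary accumulator
lemma a_fold_eq_aux (denied : List String) (allowed : List String) (acc : List String) :
    allowed.foldl (fun result action =>
      if denied.contains action then result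
      else if PySem.Str.isIn ":" action then
        if denied.contains (pvStrCat (PySem.List.pyGetD ((PySem.Str.split? action ":").getD []) 0 "") ":*") then result
        else PySem.Set.add result action
      else PySem.Set.add result action) acc
    = (allowed.filter (fun a =>
        !denied.contains a &&
        !(PySem.Str.isIn ":" a &&
          denied.contains (pvStrCat (PySem.List.pyGetD ((PySem.Str.split? a ":").getD []) 0 "") ":*")))).foldl PySem.Set.add acc := by
  induction allowed generalizing acc with
  | nil => rfl
  | cons a as ih =>
    simp only [List.foldl_cons, List.filter_cons]
    by_cases h1 : denied.contains a <;> by_cases h2 : PySem.Str.isIn ":" a = true <;>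
      simp [h1, h2, ih] <;> split_ifs <;> simp_all [ih]

-- A's loop = first-occurrence dedup of allowed filtered by A's per-action predicate
lemma a_fold_eq (allowed denied : List String) :
    allowed.foldl (fun result action =>
      if denied.contains action then result
      else if PySem.Str.isIn ":" action then
        if denied.contains (pvStrCat (PySem.List.pyGetD ((PySem.Str.split? action ":").getD []) 0 "") ":*") then result
        else PySem.Set.add result action
      else PySem.Set.add result action) []
    = PySem.Set.ofList (allowed.filter (fun a =>
        !denied.contains a &&
        !(PySem.Str.isIn ":" a &&
          denied.contains (pvStrCat (PySem.List.pyGetD ((PySem.Str.split? a ":").getD []) 0 "") ":*")))) := by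
  rw [PySem.Set.ofList_eq_foldl]
  exact a_fold_eq_aux denied allowed []

-- dedup (first occurrences) commutes with filter
lemma ofList_filter {α : Type} [DecidableEq α] (p : α → Bool) (l : List α) :
    PySem.Set.ofList (l.filter p) = (PySem.Set.ofList l).filter p := by
  induction l with
  | nil => rfl
  | cons x xs ih =>
    rw [List.filter_cons, PySem.Set.ofList_cons]
    by_cases hp : p x = true
    · rw [if_pos hp, PySem.Set.ofList_cons, List.filter_cons, if_pos hp, ih]
      show _ :: PySem.Set.discard _ x = _ :: List.filter p (PySem.Set.discard _ x)
      congr 1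
      show List.filter _ (List.filter p _) = List.filter p (List.filter _ _)
      rw [List.filter_filter, List.filter_filter]
      exact List.filter_congr (fun y _ => by rw [Bool.and_comm])
    · rw [if_neg hp, List.filter_cons, if_neg hp, ih]
      show List.filter p _ = List.filter p (List.filter _ _)
      rw [List.filter_filter]
      symm
      apply List.filter_congr
      intro y _
      by_cases hy : y = x
      · subst hy; simp [hp]
      · simp [hy]

-- B's rule loop = one filter by the conjunction of all wildcard rules
lemma b_fold_eq (denied : List String) (surv : List String) :
    denied.foldl pvPrune surv
    = surv.filter (fun a => denied.all (fun d =>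
        !(PySem.Str.endswith d ":*" && PySem.Str.isIn ":" a &&
          (PySem.List.pyGetD ((PySem.Str.split? a ":").getD []) 0 "" == PySem.Str.slice d none (some (-2)))))) := by
  induction denied generalizing surv with
  | nil => simp
  | cons d ds ih =>
    simp only [List.foldl_cons, pvPrune, List.all_cons]
    by_cases hd : PySem.Str.endswith d ":*" = true
    · rw [if_pos hd, ih]
      show List.filter _ (List.filter _ _) = _
      rw [List.filter_filter]
      apply List.filter_congr
      intro a _
      have hdc : PySem.Chars.endswith d.toList [':', '*'] = true := by
        simpa [PySem.Str.endswith] using hd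
      simp [hdc]
      rw [Bool.and_comm]
    · rw [if_neg hd, ih]
      apply List.filter_congr
      intro a _
      have hdc : PySem.Chars.endswith d.toList [':', '*'] = false := by
        simpa [PySem.Str.endswith] using Bool.eq_false_iff.mpr hd
      simp [hdc]


-- pointwise: surviving every wildcard rule = the reconstructed wildcard not being denied
lemma pred_eq (denied : List String) (a : String) :
    (denied.all (fun d =>
        !(PySem.Str.endswith d ":*" && PySem.Str.isIn ":" a &&
          (PySem.List.pyGetD ((PySem.Str.split? a ":").getD []) 0 "" == PySem.Str.slice d none (some (-2))))))
    = !(PySem.Str.isIn ":" a &&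
          denied.contains (pvStrCat (PySem.List.pyGetD ((PySem.Str.split? a ":").getD []) 0 "") ":*")) := by
  set svc := PySem.List.pyGetD ((PySem.Str.split? a ":").getD []) 0 "" with hsvc
  by_cases h2 : PySem.Str.isIn ":" a = true
  · simp only [h2, Bool.true_and, Bool.and_true]
    rw [Bool.eq_iff_iff]
    simp only [List.all_eq_true, Bool.not_eq_true', Bool.and_eq_false_iff,
      List.contains_eq_mem, decide_eq_false_iff_not]
    constructor
    · intro hall hmem
      rcases hall _ hmem with h | h
      · rw [(slice_cat_wild svc).2] at h; simp at h
      · rw [(slice_cat_wild svc).1] at h; simp at h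
    · intro hnm d hd
      by_cases he : PySem.Str.endswith d ":*" = true
      · right
        by_cases hq : (svc == PySem.Str.slice d none (some (-2))) = true
        · exfalso
          apply hnm
          have : pvStrCat svc ":*" = d := by
            rw [beq_iff_eq.mp hq]; exact eq_slice_append_of_endswith d he
          rwa [this]
        · simpa using hq
      · left; simpa using he
  · have h2c : PySem.Chars.isIn [':'] a.toList = false := by
      simpa [PySem.Str.isIn] using Bool.eq_false_iff.mpr h2
    simp [h2c]

-- ===== VERDICT (by name: the statement is the Claim_ definition above) =====
theorem apply_deny_py_spec : Claim_equal_apply_deny_py := by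
  intro allowed denied _
  unfold Spec_apply_deny_py apply_deny_py apply_deny_py_alt
  by_cases h0 : denied = []
  · rw [if_pos h0, if_pos h0]
  · rw [if_neg h0, if_neg h0]
    by_cases h1 : denied.contains "*" = true
    · rw [if_pos h1, if_pos h1]
    · rw [if_neg h1, if_neg h1, a_fold_eq, b_fold_eq]
      show _ = List.filter _ (List.filter _ _)
      rw [List.filter_filter, ofList_filter]
      apply List.filter_congr
      intro a _
      rw [pred_eq, Bool.and_comm, PySem.Set.contains_eq_listContains]
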